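-- pv_equiv track=rewrite | github.com/pml68/feladatok | celloveszet/loves.py | loertek
-- ===== SOURCE A (Python) =====
-- def loertek(sor: str) -> int:
--     aktpont = 20
--     ertek = 0
--
--     for i in range(len(sor)):
--         if aktpont > 0 and sor[i] == "-":
--             aktpont -= 1
--         else:
--             ertek += aktpont
--
--     return ertek
-- ===== SOURCE B (Python) =====
-- def loertek(sor: str) -> int:
--     total_dashes = sor.count("-")
--     n = len(sor) - total_dashes
--     suffix = 0          # non-dash chars seen so far (from the right)
--     seen = 0            # dashes seen so far (from the right)
--     reduction = 0
--     for c in reversed(sor):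
--         if c == "-":
--             seen += 1
--             if total_dashes - seen < 20:   # this dash is among the first 20 from the left
--                 reduction += suffix
--         else:
--             suffix += 1
--     return 20 * n - reduction
-- ===== Notes on version B (the rewrite author's own statement) =====
-- stated objective: alternative
-- what changed: Replaces A's forward loop with a decrementing counter by an algebraic contribution sum: one reverse pass keeps a suffix count of non-dash characters and subtracts it for each of the first 20 dashes from 20 times the non-dash count.
import Mathlib
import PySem

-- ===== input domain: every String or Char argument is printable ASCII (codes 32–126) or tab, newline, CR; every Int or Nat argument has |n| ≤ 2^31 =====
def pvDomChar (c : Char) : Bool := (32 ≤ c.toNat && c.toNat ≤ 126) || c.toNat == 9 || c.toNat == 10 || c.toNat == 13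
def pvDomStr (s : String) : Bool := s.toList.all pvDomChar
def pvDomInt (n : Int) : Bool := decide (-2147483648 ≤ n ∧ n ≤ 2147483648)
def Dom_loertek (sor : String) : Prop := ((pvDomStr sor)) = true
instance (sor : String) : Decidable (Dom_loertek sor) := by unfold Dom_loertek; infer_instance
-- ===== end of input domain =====

-- B replaces A's running-counter loop by a contribution sum: 20·(non-dash count) minus,
-- via one reverse pass with a suffix count, the non-dash chars after each of the first 20 dashes (objective: alternative).


-- ===== PORT A =====
-- for-loop over the characters with state (aktpont, ertek)
def loertek (sor : String) : Int :=
  (sor.toList.foldl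
    (fun (st : Int × Int) c =>
      if st.1 > 0 ∧ c = '-' then (st.1 - 1, st.2) else (st.1, st.2 + st.1))
    (20, 0)).2

-- ===== PORT B =====
-- reverse pass with state (suffix, seen, reduction)
def loertek_alt (sor : String) : Int :=
  20 * ((sor.toList.length : Int) - (sor.toList.count '-' : Int)) -
    (sor.toList.reverse.foldl
      (fun (st : Int × Int × Int) c =>
        if c = '-' then
          (st.1, st.2.1 + 1,
            if (sor.toList.count '-' : Int) - (st.2.1 + 1) < 20 then st.2.2 + st.1 else st.2.2)
        else
          (st.1 + 1, st.2.1, st.2.2))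
      (0, 0, 0)).2.2

-- ===== PRECONDITION & SPEC =====
def Spec_loertek (sor : String) (out : Int) : Prop := out = loertek_alt sor
instance (sor : String) (out : Int) : Decidable (Spec_loertek sor out) := by unfold Spec_loertek; infer_instance

-- ===== CLAIM (what is proved, stated in full; the proofs are below) =====
def Claim_equal_loertek : Prop := ∀ (sor : String), Dom_loertek sor → Spec_loertek sor (loertek sor)

-- ===== LEMMAS AND PROOFS =====

-- A's loop as a function of the remaining list and the current aktpont
def pvAf : List Char → Int → Int
  | [], _ => 0
  | c :: t, a => if a > 0 ∧ c = '-' then pvAf t (a - 1) else a + pvAf t a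

-- non-dash count
def pvNd (l : List Char) : Int := (l.length : Int) - (l.count '-' : Int)

-- B's reduction, as a recursion over the list (D = total dash count of the whole string)
def pvR (D : Int) : List Char → Int
  | [] => 0
  | c :: t =>
      if c = '-' then
        (if D - ((t.count '-' : Int) + 1) < 20 then pvR D t + pvNd t else pvR D t)
      else pvR D t

lemma pvAf_foldl (l : List Char) : ∀ (a e : Int),
    (l.foldl (fun (st : Int × Int) c =>
      if st.1 > 0 ∧ c = '-' then (st.1 - 1, st.2) else (st.1, st.2 + st.1)) (a, e)).2
    = e + pvAf l a := by
  induction l with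
  | nil => intro a e; simp [pvAf]
  | cons c t ih =>
      intro a e
      by_cases h : a > 0 ∧ c = '-'
      · simp [pvAf, h, ih]
      · simp [pvAf, h, ih]; ring

lemma pvB_foldr (D : Int) (l : List Char) :
    (l.foldr (fun c (st : Int × Int × Int) =>
      if c = '-' then
        (st.1, st.2.1 + 1, if D - (st.2.1 + 1) < 20 then st.2.2 + st.1 else st.2.2)
      else
        (st.1 + 1, st.2.1, st.2.2)) (0, 0, 0))
    = (pvNd l, (l.count '-' : Int), pvR D l) := by
  induction l with
  | nil => simp [pvNd, pvR]
  | cons c t ih =>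
      by_cases h : c = '-'
      · simp only [List.foldr_cons, ih, pvR, if_pos h]
        refine Prod.ext ?_ (Prod.ext ?_ rfl)
        · simp [pvNd, h]
        · simp [h]
      · simp only [List.foldr_cons, ih, pvR, if_neg h]
        refine Prod.ext ?_ (Prod.ext ?_ rfl)
        · simp [pvNd, h]; ring
        · simp [h]

lemma pvMain (l : List Char) : ∀ (k : Int), 0 ≤ k →
    pvAf l (max 0 (20 - k)) = max 0 (20 - k) * pvNd l - pvR (k + (l.count '-' : Int)) l := by
  induction l with
  | nil => intro k _; simp [pvAf, pvNd, pvR]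
  | cons c t ih =>
      intro k hk
      have hcountD : ((c :: t).count '-' : Int)
          = (t.count '-' : Int) + (if c = '-' then 1 else 0) := by
        by_cases h : c = '-' <;> simp [h]
      by_cases h : c = '-'
      · have hD : k + ((c :: t).count '-' : Int) = (k + 1) + (t.count '-' : Int) := by
          rw [hcountD]; simp [h]; ring
        have hndeq : pvNd (c :: t) = pvNd t := by
          simp [pvNd, h]
        by_cases hk20 : k < 20
        · have ha : max 0 (20 - k) > 0 := by omega
          have hgood : max 0 (20 - k) > 0 ∧ c = '-' := ⟨ha, h⟩
          have hcond : (k + ((c :: t).count '-' : Int)) - ((t.count '-' : Int) + 1) < 20 := by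
            rw [hD]; omega
          simp only [pvAf, if_pos hgood, pvR, if_pos h, hD, hndeq]
          have hstep : max 0 (20 - k) - 1 = max 0 (20 - (k + 1)) := by omega
          rw [hstep, ih (k + 1) (by omega)]
          have hm : max 0 (20 - k) = max 0 (20 - (k + 1)) + 1 := by omega
          rw [hm]
          split_ifs with hc
          · ring
          · exact (hc (by omega)).elim
        · have ha : max 0 (20 - k) = 0 := by omega
          have hbad : ¬ (max 0 (20 - k) > 0 ∧ c = '-') := by
            intro hc; omega
          have hcond : ¬ ((k + ((c :: t).count '-' : Int)) - ((t.count '-' : Int) + 1) < 20) := by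
            rw [hD]; omega
          simp only [pvAf, if_neg hbad, pvR, if_pos h, hD, hndeq]
          have hiht := ih (k + 1) (by omega)
          have ha' : max 0 (20 - (k + 1)) = 0 := by omega
          rw [ha'] at hiht
          rw [ha, hiht]
          split_ifs with hc
          · exact (hk20 (by omega)).elim
          · ring
      · have hD : k + ((c :: t).count '-' : Int) = k + (t.count '-' : Int) := by
          rw [hcountD]; simp [h]
        have hndeq : pvNd (c :: t) = pvNd t + 1 := by
          simp [pvNd, h]; ring
        have hbad : ¬ (max 0 (20 - k) > 0 ∧ c = '-') := by
          intro hc; exact h hc.2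
        simp only [pvAf, if_neg hbad, pvR, if_neg h, hD, hndeq]
        rw [ih k hk]
        ring

-- ===== VERDICT (by name: the statement is the Claim_ definition above) =====
theorem loertek_spec : Claim_equal_loertek := by
  intro sor _
  unfold Spec_loertek loertek loertek_alt
  rw [List.foldl_reverse, pvB_foldr, pvAf_foldl]
  have hM := pvMain sor.toList 0 (by norm_num)
  simp only [zero_add] at hM
  have h20 : (max 0 (20 - 0) : Int) = 20 := by norm_num
  rw [h20] at hM
  rw [hM, pvNd]
  ring
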